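-- pv_equiv track=rewrite | github.com/ndevanthery/Bachelor-Thesis | Algorithms/Common.py | SplitDataByOrgans
-- ===== SOURCE A (Python) =====
-- def SplitDataByOrgans(tokened_sent):
--     infos = []
--     organes = []
--
--     for sen in tokened_sent:
--         splittedSen = sen.split(':')
--         if (len(splittedSen) > 1):
--             organes.append(splittedSen[0])
--             infos.append(splittedSen[1])
--         else:
--             if (len(infos) != 0):
--                 infos[len(infos)-1] += sen
--     organInfos = {}
--
--     for i in range(0, len(infos)):
--
--         organInfos[organes[i].lower().rstrip()] = infos[i]
--
--     return organInfos
-- ===== SOURCE B (Python) =====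
-- def SplitDataByOrgans(tokened_sent):
--     result = {}
--     current = None
--     for sen in tokened_sent:
--         parts = sen.split(':')
--         if len(parts) > 1:
--             current = parts[0].lower().rstrip()
--             result[current] = parts[1]
--         elif current is not None:
--             result[current] += sen
--     return result
-- ===== Notes on version B (the rewrite author's own statement) =====
-- stated objective: simpler
-- what changed: Single pass that builds the dict directly while tracking the current organ key, instead of collecting parallel organes/infos lists (with last-element patching) and a second index loop that normalises keys and fills the dict.
import Mathlib
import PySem

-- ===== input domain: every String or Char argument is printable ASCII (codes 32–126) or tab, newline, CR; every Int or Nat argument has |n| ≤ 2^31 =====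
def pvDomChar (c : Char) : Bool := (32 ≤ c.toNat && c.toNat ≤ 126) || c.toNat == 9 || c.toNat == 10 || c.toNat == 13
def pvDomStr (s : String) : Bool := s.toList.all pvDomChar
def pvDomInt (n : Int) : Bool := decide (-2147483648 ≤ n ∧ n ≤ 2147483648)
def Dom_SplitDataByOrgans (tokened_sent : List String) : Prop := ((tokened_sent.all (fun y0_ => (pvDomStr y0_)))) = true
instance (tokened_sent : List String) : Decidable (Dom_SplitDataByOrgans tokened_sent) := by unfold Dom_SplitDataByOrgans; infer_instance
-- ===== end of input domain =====

-- B replaces A's two passes (parallel organes/infos lists with last-element patching, then an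
-- index loop building the dict) by one pass that builds the dict directly, tracking the current key.

-- ===== PORT A =====
-- first loop: state is (infos, organes); ':' is a nonempty separator so split? is always some;
-- pyGetD defaults are never used: indices 0/1 exist when length > 1, and the last-element
-- assignment only runs when infos ≠ [].
def SplitDataByOrgans (tokened_sent : List String) : List (String × String) :=
  let st := tokened_sent.foldl
    (fun (st : List String × List String) sen =>
      let splittedSen := (PySem.Str.split? sen ":").getD []
      if splittedSen.length > 1 then
        (st.1 ++ [PySem.List.pyGetD splittedSen 1 ""],
         st.2 ++ [PySem.List.pyGetD splittedSen 0 ""])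
      else
        if st.1.length ≠ 0 then
          (st.1.set (st.1.length - 1)
             (PySem.List.pyGetD st.1 ((st.1.length : Int) - 1) "" ++ sen), st.2)
        else st)
    ([], [])
  -- second loop: for i in range(0, len(infos)): organInfos[organes[i].lower().rstrip()] = infos[i]
  (PySem.List.pyRange 0 (st.1.length : Int) 1).foldl
    (fun (d : PySem.Dict String String) i =>
      d.insert (PySem.Str.rstrip (PySem.Str.lower (PySem.List.pyGetD st.2 i "")))
        (PySem.List.pyGetD st.1 i ""))
    PySem.Dict.empty
  |>.items

-- ===== PORT B =====
-- single pass; 'result[current] += sen' is Dict.modify (the key is always present, so the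
-- default "" is never used, matching Python's in-place update).
def SplitDataByOrgans_alt (tokened_sent : List String) : List (String × String) :=
  (tokened_sent.foldl
    (fun (st : PySem.Dict String String × Option String) sen =>
      let parts := (PySem.Str.split? sen ":").getD []
      if parts.length > 1 then
        let key := PySem.Str.rstrip (PySem.Str.lower (PySem.List.pyGetD parts 0 ""))
        (st.1.insert key (PySem.List.pyGetD parts 1 ""), some key)
      else
        match st.2 with
        | some k => (st.1.modify k "" (· ++ sen), some k)
        | none => st)
    (PySem.Dict.empty, none)).1.items

-- ===== PRECONDITION & SPEC =====
def Spec_SplitDataByOrgans (tokened_sent : List String) (out : List (String × String)) : Prop := out = SplitDataByOrgans_alt tokened_sent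
instance (tokened_sent : List String) (out : List (String × String)) : Decidable (Spec_SplitDataByOrgans tokened_sent out) := by unfold Spec_SplitDataByOrgans; infer_instance

-- ===== CLAIM (what is proved, stated in full; the proofs are below) =====
def Claim_equal_SplitDataByOrgans : Prop := ∀ (tokened_sent : List String), Dom_SplitDataByOrgans tokened_sent → Spec_SplitDataByOrgans tokened_sent (SplitDataByOrgans tokened_sent)

-- ===== LEMMAS AND PROOFS =====

def pvNorm (s : String) : String := PySem.Str.rstrip (PySem.Str.lower s)

def pvStepA (st : List String × List String) (sen : String) : List String × List String :=
  let splittedSen := (PySem.Str.split? sen ":").getD []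
  if splittedSen.length > 1 then
    (st.1 ++ [PySem.List.pyGetD splittedSen 1 ""],
     st.2 ++ [PySem.List.pyGetD splittedSen 0 ""])
  else
    if st.1.length ≠ 0 then
      (st.1.set (st.1.length - 1)
         (PySem.List.pyGetD st.1 ((st.1.length : Int) - 1) "" ++ sen), st.2)
    else st

def pvStepB (st : PySem.Dict String String × Option String) (sen : String) :
    PySem.Dict String String × Option String :=
  let parts := (PySem.Str.split? sen ":").getD []
  if parts.length > 1 then
    let key := pvNorm (PySem.List.pyGetD parts 0 "")
    (st.1.insert key (PySem.List.pyGetD parts 1 ""), some key)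
  else
    match st.2 with
    | some k => (st.1.modify k "" (· ++ sen), some k)
    | none => st

def pvBuild (ps : List (String × String)) : PySem.Dict String String :=
  ps.foldl (fun d p => d.insert (pvNorm p.2) p.1) PySem.Dict.empty

-- the one-pass state corresponding to A's (infos, organes) lists
def pvAbs (st : List String × List String) : PySem.Dict String String × Option String :=
  (pvBuild (st.1.zip st.2), st.2.getLast?.map pvNorm)

lemma pvBuild_append (ps : List (String × String)) (p : String × String) :
    pvBuild (ps ++ [p]) = (pvBuild ps).insert (pvNorm p.2) p.1 := by
  simp [pvBuild]

lemma pvStep_comm (st : List String × List String) (h : st.1.length = st.2.length)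
    (sen : String) :
    pvStepB (pvAbs st) sen = pvAbs (pvStepA st sen) ∧
      (pvStepA st sen).1.length = (pvStepA st sen).2.length := by
  obtain ⟨infos, organes⟩ := st
  have h' : infos.length = organes.length := by simpa using h
  simp only [pvStepA, pvStepB]
  by_cases hs : ((PySem.Str.split? sen ":").getD []).length > 1
  · simp only [hs, if_pos]
    refine ⟨?_, by simp [h']⟩
    simp only [pvAbs, List.zip_append h']
    simp [pvBuild, List.foldl_append]
  · simp only [hs, if_false, ite_not]
    by_cases hi : infos.length = 0
    · have h1 : infos = [] := List.length_eq_zero_iff.mp hi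
      have h2 : organes = [] := List.length_eq_zero_iff.mp (by simp [h1] at h'; omega)
      subst h1; subst h2
      simp [pvAbs, pvBuild]
    · rcases List.eq_nil_or_concat infos with h1 | ⟨is, v, h1⟩
      · exact absurd (by simp [h1]) hi
      rcases List.eq_nil_or_concat organes with h2 | ⟨os, o, h2⟩
      · exact absurd (by rw [h2] at h'; simpa using h') hi
      subst h1; subst h2
      simp only [List.concat_eq_append] at *
      have hlen : is.length = os.length := by simpa using h'
      simp only [hi, if_false]
      have hget : PySem.List.pyGetD (is ++ [v]) (((is ++ [v]).length : Int) - 1) "" = v := by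
        rw [PySem.List.pyGetD_eq_getElem _ _ (by simp) (by simp)]
        simp
      have hset : (is ++ [v]).set ((is ++ [v]).length - 1)
          (PySem.List.pyGetD (is ++ [v]) (((is ++ [v]).length : Int) - 1) "" ++ sen)
          = is ++ [v ++ sen] := by
        rw [hget]; simp
      rw [hset]
      refine ⟨?_, by simp [hlen]⟩
      simp only [pvAbs, List.zip_append hlen, List.getLast?_append,
        List.getLast?_singleton]
      have hmod : ((pvBuild (is.zip os)).insert (pvNorm o) v).modify (pvNorm o) "" (· ++ sen)
          = (pvBuild (is.zip os)).insert (pvNorm o) (v ++ sen) := by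
        show ((pvBuild (is.zip os)).insert (pvNorm o) v).insert (pvNorm o)
            (((pvBuild (is.zip os)).insert (pvNorm o) v).getD (pvNorm o) "" ++ sen) = _
        rw [PySem.Dict.getD_insert_self, PySem.Dict.insert_insert_self]
      simp [pvBuild_append, hmod]

lemma pv_loop (l : List String) (st : List String × List String)
    (h : st.1.length = st.2.length) :
    l.foldl pvStepB (pvAbs st) = pvAbs (l.foldl pvStepA st) := by
  induction l generalizing st with
  | nil => rfl
  | cons sen t ih =>
    have := pvStep_comm st h sen
    simp only [List.foldl_cons, this.1]
    exact ih _ this.2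

lemma pv_range_eq (infos organes : List String) (h : infos.length = organes.length) :
    (PySem.List.pyRange 0 (infos.length : Int) 1).foldl
      (fun (d : PySem.Dict String String) i =>
        d.insert (pvNorm (PySem.List.pyGetD organes i ""))
          (PySem.List.pyGetD infos i ""))
      PySem.Dict.empty = pvBuild (infos.zip organes) := by
  have hlen : ((infos.zip organes).length : Int) = (infos.length : Int) := by
    simp [List.length_zip, h]
  rw [← hlen]
  rw [PySem.List.foldl_congr_mem _ _
    (fun (d : PySem.Dict String String) i =>
      d.insert (pvNorm (PySem.List.pyGetD (infos.zip organes) i ("", "")).2)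
        (PySem.List.pyGetD (infos.zip organes) i ("", "")).1) _ ?_]
  · exact PySem.List.foldl_pyRange_zero_pyGetD' (infos.zip organes) ("", "")
      (fun d p => d.insert (pvNorm p.2) p.1) PySem.Dict.empty
  · intro acc i hi
    beta_reduce
    rw [PySem.List.mem_pyRange_one] at hi
    have h0 : 0 ≤ i := hi.1
    have h1 : i < ((infos.zip organes).length : Int) := hi.2
    have h1i : i < (infos.length : Int) := by omega
    have h1o : i < (organes.length : Int) := by rw [← h]; omega
    rw [PySem.List.pyGetD_eq_getElem _ _ h0 h1,
        PySem.List.pyGetD_eq_getElem _ _ h0 h1i,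
        PySem.List.pyGetD_eq_getElem _ _ h0 h1o]
    simp

-- ===== VERDICT (by name: the statement is the Claim_ definition above) =====
theorem SplitDataByOrgans_spec : Claim_equal_SplitDataByOrgans := by
  intro l _
  show SplitDataByOrgans l = SplitDataByOrgans_alt l
  have hA : SplitDataByOrgans l =
      ((PySem.List.pyRange 0 (((l.foldl pvStepA ([], [])).1.length : Int)) 1).foldl
        (fun (d : PySem.Dict String String) i =>
          d.insert (pvNorm (PySem.List.pyGetD (l.foldl pvStepA ([], [])).2 i ""))
            (PySem.List.pyGetD (l.foldl pvStepA ([], [])).1 i ""))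
        PySem.Dict.empty).items := rfl
  have hB : SplitDataByOrgans_alt l = (l.foldl pvStepB (PySem.Dict.empty, none)).1.items := rfl
  have hlen : ∀ (t : List String) (st : List String × List String),
      st.1.length = st.2.length →
      (t.foldl pvStepA st).1.length = (t.foldl pvStepA st).2.length := by
    intro t
    induction t with
    | nil => intro st h; exact h
    | cons s t ih => intro st h; exact ih _ (pvStep_comm st h s).2
  rw [hA, hB]
  have h0 : (pvAbs ([], [])) = ((PySem.Dict.empty : PySem.Dict String String), none) := rfl
  rw [← h0, pv_loop l ([], []) rfl,
      pv_range_eq _ _ (hlen l ([], []) rfl)]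
  rfl
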